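-- pv_equiv track=rewrite | github.com/lecerick/project-euler | PE/p051_prime_digit_replacements.py | replacement_list
-- ===== SOURCE A (Python) =====
-- import itertools
--
-- def replacement_list(n: int) -> list:
--     # takes a number n and returns a list of all possible replacements
--     # e.g. if n is 13, returns ['*3', '1*']
--     repl_list = []
--     permutes = [''.join(perm) for perm in itertools.product(['0','1'],repeat=len(str(n)))]
--     permutes.remove('1'*len(str(n)))
--     permutes.remove('0'*len(str(n)))
--     for permute in permutes:
--         n_repl_str = ''.join([str(n)[i] if permute[i]=='0' else '*' for i in range(len(str(n)))])
--         repl_list.append(n_repl_str)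
--     return repl_list
-- ===== SOURCE B (Python) =====
-- def replacement_list(n: int) -> list:
--     # recursively build every keep/star pattern string of str(n) directly
--     # (keep-first ordering), then slice off the trivial first (no stars)
--     # and last (all stars) entries
--     def gen(s):
--         if not s:
--             return ['']
--         tails = gen(s[1:])
--         return [s[0] + t for t in tails] + ['*' + t for t in tails]
--     return gen(str(n))[1:-1]
-- ===== Notes on version B (the rewrite author's own statement) =====
-- stated objective: alternative
-- what changed: Replaces itertools.product over pattern alphabets plus two O(2^d) list.remove scans and a per-pattern character-matching pass with a structural recursion on the digit string that builds the replacement strings themselves directly (keep-branch ++ star-branch), trimming the two trivial entries with a single [1:-1] slice.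
import Mathlib
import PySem

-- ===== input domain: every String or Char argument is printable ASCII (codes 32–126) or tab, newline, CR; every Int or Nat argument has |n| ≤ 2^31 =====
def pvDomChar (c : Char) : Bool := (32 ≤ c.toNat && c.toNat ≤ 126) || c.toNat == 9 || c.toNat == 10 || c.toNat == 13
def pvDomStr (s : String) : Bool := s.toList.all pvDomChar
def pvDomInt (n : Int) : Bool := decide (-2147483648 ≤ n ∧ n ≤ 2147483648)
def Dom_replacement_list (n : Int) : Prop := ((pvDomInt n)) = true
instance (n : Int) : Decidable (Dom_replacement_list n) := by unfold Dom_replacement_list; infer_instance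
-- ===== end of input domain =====

-- B replaces itertools.product + two list.remove scans with a structural recursion on the
-- digit string that builds the replacement strings directly, trimmed by one [1:-1] slice
-- (alternative formulation; same enumeration order, same values).


-- ===== PORT A =====
-- itertools.product(['0','1'], repeat=d), each tuple already ''.join-ed (strings as List Char)
def prodA : Nat → List (List Char)
  | 0 => [[]]
  | d+1 => (prodA d).map ('0' :: ·) ++ (prodA d).map ('1' :: ·)

def replacement_list (n : Int) : List String :=
  let s := PySem.Int.toChars n
  let permutes := prodA s.length
  -- the two .remove calls; none would be ValueError, unreachable since str(n) is nonempty,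
  -- so the all-'1' and all-'0' patterns both occur in the product list
  match PySem.List.remove? permutes (List.replicate s.length '1') with
  | none => []
  | some p1 =>
    match PySem.List.remove? p1 (List.replicate s.length '0') with
    | none => []
    | some p2 =>
      p2.map (fun permute => String.ofList ((PySem.List.pyRange 0 (s.length : Int) 1).map (fun i =>
        if PySem.List.pyGetD permute i ' ' = '0' then PySem.List.pyGetD s i ' ' else '*')))

-- ===== PORT B =====
-- gen(s): structural recursion building the replacement strings directly (strings as List Char)
def genB : List Char → List (List Char)
  | [] => [[]]
  | c :: rest =>
    let tails := genB rest
    tails.map (c :: ·) ++ tails.map ('*' :: ·)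

def replacement_list_alt (n : Int) : List String :=
  PySem.List.slice ((genB (PySem.Int.toChars n)).map String.ofList) (some 1) (some (-1))

-- ===== PRECONDITION & SPEC =====
def Spec_replacement_list (n : Int) (out : List String) : Prop := out = replacement_list_alt n
instance (n : Int) (out : List String) : Decidable (Spec_replacement_list n out) := by unfold Spec_replacement_list; infer_instance

-- ===== CLAIM (what is proved, stated in full; the proofs are below) =====
def Claim_equal_replacement_list : Prop := ∀ (n : Int), Dom_replacement_list n → Spec_replacement_list n (replacement_list n)

-- ===== LEMMAS AND PROOFS =====

-- the pattern tuple of itertools.product at index m (most-significant bit first)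
def pvBits (d m : Nat) : List Char :=
  (List.range d).map (fun i => if m.testBit (d - 1 - i) then '1' else '0')

-- the replacement string at index m (most-significant position varies slowest)
def pvStars : List Char → Nat → List Char
  | [], _ => []
  | c :: rest, m =>
    if m < 2 ^ rest.length then c :: pvStars rest m
    else '*' :: pvStars rest (m - 2 ^ rest.length)

theorem pvBits_succ_lo {d m : Nat} (h : m < 2 ^ d) :
    pvBits (d+1) m = '0' :: pvBits d m := by
  unfold pvBits
  rw [List.range_succ_eq_map]
  simp only [List.map_cons, List.map_map]
  congr 1
  · simp [Nat.testBit_lt_two_pow h]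
  · apply List.map_congr_left
    intro i _
    simp only [Function.comp]
    have : d + 1 - 1 - (i+1) = d - 1 - i := by omega
    rw [this]

theorem pvBits_succ_hi {d m : Nat} (h : m < 2 ^ d) :
    pvBits (d+1) (2 ^ d + m) = '1' :: pvBits d m := by
  unfold pvBits
  rw [List.range_succ_eq_map]
  simp only [List.map_cons, List.map_map]
  congr 1
  · have h1 : (2^d + m).testBit d = true := by
      rw [Nat.testBit_two_pow_add_eq]
      simp [Nat.testBit_lt_two_pow h]
    simp [h1]
  · apply List.map_congr_left
    intro i hi
    simp only [Function.comp]
    rw [List.mem_range] at hi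
    have : d + 1 - 1 - (i+1) = d - 1 - i := by omega
    rw [this, Nat.testBit_two_pow_add_gt (by omega) m]

theorem prodA_eq (d : Nat) : prodA d = (List.range (2 ^ d)).map (pvBits d) := by
  induction d with
  | zero => simp [prodA, pvBits]
  | succ d ih =>
    rw [prodA, ih]
    have h2 : 2 ^ (d+1) = 2 ^ d + 2 ^ d := by ring
    rw [h2, List.range_add, List.map_append, List.map_map, List.map_map, List.map_map]
    congr 1
    · apply List.map_congr_left
      intro m hm
      rw [List.mem_range] at hm
      simp only [Function.comp]
      exact (pvBits_succ_lo hm).symm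
    · apply List.map_congr_left
      intro m hm
      rw [List.mem_range] at hm
      simp only [Function.comp]
      exact (pvBits_succ_hi hm).symm

theorem genB_eq (s : List Char) :
    genB s = (List.range (2 ^ s.length)).map (pvStars s) := by
  induction s with
  | nil => simp [genB, pvStars]
  | cons c rest ih =>
    have hun : genB (c :: rest) = (genB rest).map (c :: ·) ++ (genB rest).map ('*' :: ·) := rfl
    rw [hun, ih]
    have h2 : 2 ^ (c :: rest).length = 2 ^ rest.length + 2 ^ rest.length := by
      simp [List.length_cons]; ring
    rw [h2, List.range_add, List.map_append, List.map_map, List.map_map, List.map_map]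
    congr 1
    · apply List.map_congr_left
      intro m hm
      rw [List.mem_range] at hm
      simp only [Function.comp]
      rw [pvStars]
      simp [hm]
    · apply List.map_congr_left
      intro m hm
      rw [List.mem_range] at hm
      simp only [Function.comp]
      rw [pvStars]
      have : ¬ (2 ^ rest.length + m < 2 ^ rest.length) := by omega
      simp [this]

theorem pvBits_zero (d : Nat) : pvBits d 0 = List.replicate d '0' := by
  unfold pvBits
  rw [List.eq_replicate_iff]
  simp

theorem pvBits_ones (d : Nat) : pvBits d (2 ^ d - 1) = List.replicate d '1' := by
  unfold pvBits
  rw [List.eq_replicate_iff]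
  refine ⟨by simp, ?_⟩
  intro b hb
  simp only [List.mem_map, List.mem_range] at hb
  obtain ⟨i, hi, rfl⟩ := hb
  rw [Nat.testBit_two_pow_sub_one]
  have h1 : d - 1 - i < d := by omega
  simp [h1]

theorem pvBits_ne_ones {d m : Nat} (h : m < 2 ^ d - 1) :
    pvBits d m ≠ List.replicate d '1' := by
  intro he
  have : m = 2 ^ d - 1 := by
    apply Nat.eq_of_testBit_eq
    intro i
    rw [Nat.testBit_two_pow_sub_one]
    by_cases hi : i < d
    · have hmem : (if m.testBit (d - 1 - (d - 1 - i)) then '1' else '0') ∈ pvBits d m := by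
        unfold pvBits
        exact List.mem_map_of_mem (by rw [List.mem_range]; omega)
      rw [he] at hmem
      have := List.eq_of_mem_replicate hmem
      have hdd : d - 1 - (d - 1 - i) = i := by omega
      rw [hdd] at this
      simp [hi]
      by_contra hf
      simp [hf] at this
    · have hle : 2 ^ d ≤ 2 ^ i := Nat.pow_le_pow_right (by omega) (by omega)
      have hm : m < 2 ^ i := by omega
      simp [Nat.testBit_lt_two_pow hm, hi]
  omega

theorem pvRemove_last {α : Type} [BEq α] [LawfulBEq α] (l : List α) (v : α) (h : v ∉ l) :
    PySem.List.remove? (l ++ [v]) v = some l := by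
  rw [PySem.List.remove?_eq_some_erase _ v (by simp)]
  rw [List.erase_append_right _ (by simpa using h)]
  simp

theorem pvBits_length (d m : Nat) : (pvBits d m).length = d := by
  simp [pvBits]

-- pvStars in indexed form, for the pointwise comparison with A's pattern matching
theorem pvStars_eq (s : List Char) (m : Nat) (h : m < 2 ^ s.length) :
    pvStars s m = (List.range s.length).map
      (fun i => if m.testBit (s.length - 1 - i) then '*' else s.getD i ' ') := by
  induction s generalizing m with
  | nil => simp [pvStars]
  | cons c rest ih =>
    simp only [List.length_cons] at h ⊢
    rw [List.range_succ_eq_map, List.map_cons, List.map_map]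
    by_cases hm : m < 2 ^ rest.length
    · rw [pvStars]
      simp only [hm, if_true]
      congr 1
      · simp [Nat.testBit_lt_two_pow hm]
      · rw [ih m hm]
        apply List.map_congr_left
        intro i hi
        rw [List.mem_range] at hi
        simp only [Function.comp]
        simp
        simp only [show rest.length - (i+1) = rest.length - 1 - i from by omega]
    · rw [pvStars]
      simp only [hm, if_false]
      obtain ⟨k, rfl⟩ : ∃ k, m = 2 ^ rest.length + k := ⟨m - 2 ^ rest.length, by omega⟩
      have hk : k < 2 ^ rest.length := by
        have : 2 ^ (rest.length + 1) = 2 ^ rest.length + 2 ^ rest.length := by ring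
        omega
      congr 1
      · have h1 : (2 ^ rest.length + k).testBit rest.length = true := by
          rw [Nat.testBit_two_pow_add_eq]
          simp [Nat.testBit_lt_two_pow hk]
        simp [h1]
      · have hsub : 2 ^ rest.length + k - 2 ^ rest.length = k := by omega
        rw [hsub, ih k hk]
        apply List.map_congr_left
        intro i hi
        rw [List.mem_range] at hi
        simp only [Function.comp]
        simp
        simp only [show rest.length - (i+1) = rest.length - 1 - i from by omega,
          Nat.testBit_two_pow_add_gt (show rest.length - 1 - i < rest.length from by omega) k]

-- A's per-pattern build at pattern pvBits d m equals the recursive string pvStars s m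
theorem pvBuildA_eq (s : List Char) (m : Nat) (h : m < 2 ^ s.length) :
    String.ofList ((PySem.List.pyRange 0 (s.length : Int) 1).map (fun i =>
      if PySem.List.pyGetD (pvBits s.length m) i ' ' = '0' then PySem.List.pyGetD s i ' ' else '*'))
    = String.ofList (pvStars s m) := by
  rw [pvStars_eq s m h]
  congr 1
  rw [PySem.List.pyRange_one 0 (s.length : Int)]
  have hc : ((s.length : Int) - 0).toNat = s.length := by omega
  rw [hc, List.map_map]
  apply List.map_congr_left
  intro j hj
  rw [List.mem_range] at hj
  simp only [Function.comp]
  have h0 : (0 : Int) + (j : Int) = (j : Int) := by ring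
  rw [h0]
  have hget : PySem.List.pyGetD (pvBits s.length m) (j : Int) ' '
      = (if m.testBit (s.length - 1 - j) then '1' else '0') := by
    rw [PySem.List.pyGetD_natCast]
    rw [List.getD_eq_getElem _ _ (by rw [pvBits_length]; exact hj)]
    simp [pvBits]
  rw [hget, PySem.List.pyGetD_natCast]
  rw [List.getD_eq_getElem _ _ hj]
  rcases hb : m.testBit (s.length - 1 - j) with _ | _ <;> simp

-- xs[1:-1] peels the first and last elements
theorem pvSlice_one_negone {a : Type} (xs : List a) :
    PySem.List.slice xs (some 1) (some (-1)) = xs.tail.dropLast := by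
  simp [PySem.List.slice, PySem.List.clampIdx]
  cases xs with
  | nil => simp
  | cons x l => simp [List.dropLast_eq_take]

theorem pvToChars_pos (n : Int) : 0 < (PySem.Int.toChars n).length := by
  unfold PySem.Int.toChars
  split_ifs
  · simp
  · exact Nat.length_toDigits_pos

theorem pvMain (n : Int) : replacement_list n = replacement_list_alt n := by
  unfold replacement_list replacement_list_alt
  dsimp only
  set s := PySem.Int.toChars n with hs
  set d := s.length with hd
  have hd1 : 0 < d := pvToChars_pos n
  have h2 : 2 ≤ 2 ^ d := by
    calc 2 = 2 ^ 1 := by norm_num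
    _ ≤ 2 ^ d := Nat.pow_le_pow_right (by omega) hd1
  obtain ⟨N, hN⟩ : ∃ N, 2 ^ d = N + 2 := ⟨2 ^ d - 2, by omega⟩
  -- A side: reduce to a map over range N, shifted by one
  rw [prodA_eq, hN]
  rw [show N + 2 = (N + 1) + 1 from rfl, List.range_succ, List.map_append, List.map_cons,
    List.map_nil]
  have hones : pvBits d (N + 1) = List.replicate d '1' := by
    rw [show N + 1 = 2 ^ d - 1 by omega]; exact pvBits_ones d
  rw [hones]
  have hnot : List.replicate d '1' ∉ (List.range (N + 1)).map (pvBits d) := by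
    simp only [List.mem_map, List.mem_range]
    rintro ⟨m, hm, he⟩
    exact pvBits_ne_ones (show m < 2 ^ d - 1 by omega) he
  rw [pvRemove_last _ _ hnot]
  rw [List.range_succ_eq_map, List.map_cons, pvBits_zero]
  dsimp only
  rw [PySem.List.remove?_cons_self]
  dsimp only
  rw [List.map_map, List.map_map]
  -- B side: genB = map pvStars over range (2^d); [1:-1] peels head and last
  rw [genB_eq, ← hd, hN, List.map_map, pvSlice_one_negone]
  rw [show N + 2 = (N + 1) + 1 from rfl, List.range_succ_eq_map, List.map_cons, List.tail_cons,
    List.map_map, List.range_succ, List.map_append, List.map_singleton, List.dropLast_concat]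
  apply List.map_congr_left
  intro k hk
  rw [List.mem_range] at hk
  simp only [Function.comp]
  have hlt : k + 1 < 2 ^ s.length := by rw [← hd]; omega
  exact pvBuildA_eq s (k + 1) hlt

-- ===== VERDICT (by name: the statement is the Claim_ definition above) =====
theorem replacement_list_spec : Claim_equal_replacement_list := by
  intro n _
  unfold Spec_replacement_list
  exact pvMain n
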